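-- pv_equiv track=rewrite | github.com/KallebeLisboa/Formularios-de-APC | Questionários de Listas  e Tuplas 2/exercício 01.py | verifica_poneglifo
-- ===== SOURCE A (Python) =====
-- def verifica_poneglifo(matriz, n):
--     for i in range(n):
--         for j in range(n):
--             if matriz[i][j] == 'X':
--                 # Deve estar na diagonal principal ou secundária
--                 if i != j and i + j != n - 1:
--                     return False
--             else:
--                 # Não deve estar na diagonal principal ou secundária
--                 if i == j or i + j == n - 1:
--                     return False
--     return True
-- ===== SOURCE B (Python) =====
-- def verifica_poneglifo(matriz, n):
--     expected = {(i, i) for i in range(n)} | {(i, n - 1 - i) for i in range(n)}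
--     actual = {(i, j) for i in range(n) for j in range(n) if matriz[i][j] == 'X'}
--     return actual == expected
-- ===== Notes on version B (the rewrite author's own statement) =====
-- stated objective: simpler
-- what changed: replaces the branch-per-cell nested loop with early return by building the set of expected diagonal coordinates and the set of actual 'X' positions and comparing the two sets
-- outside the precondition, e.g. on verifica_poneglifo([['']], 2): A returns False, B raises IndexError
import Mathlib
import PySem

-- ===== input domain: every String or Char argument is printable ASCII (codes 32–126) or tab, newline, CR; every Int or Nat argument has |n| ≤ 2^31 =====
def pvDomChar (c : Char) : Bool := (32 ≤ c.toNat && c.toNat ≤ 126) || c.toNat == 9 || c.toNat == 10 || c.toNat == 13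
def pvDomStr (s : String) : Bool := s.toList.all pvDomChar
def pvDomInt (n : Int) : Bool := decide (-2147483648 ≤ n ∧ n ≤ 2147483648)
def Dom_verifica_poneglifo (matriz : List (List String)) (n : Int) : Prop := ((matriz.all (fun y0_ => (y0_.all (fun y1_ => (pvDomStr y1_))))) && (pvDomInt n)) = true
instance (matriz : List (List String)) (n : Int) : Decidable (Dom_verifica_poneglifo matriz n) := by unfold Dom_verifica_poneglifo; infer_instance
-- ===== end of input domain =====

-- B replaces A's branch-per-cell scan with build-then-compare over coordinate sets (objective: simpler).

-- ===== PORT A =====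
-- matriz[i][j]; the defaults are only reached outside Pre_ (where the Python raises IndexError)
def vpCell (matriz : List (List String)) (i j : Int) : String :=
  PySem.List.pyGetD (PySem.List.pyGetD matriz i []) j ""

def verifica_poneglifo (matriz : List (List String)) (n : Int) : Bool :=
  (PySem.List.pyRange 0 n 1).all (fun i =>
    (PySem.List.pyRange 0 n 1).all (fun j =>
      if vpCell matriz i j == "X" then
        -- Deve estar na diagonal principal ou secundária
        if i ≠ j ∧ i + j ≠ n - 1 then false else true
      else
        -- Não deve estar na diagonal principal ou secundária
        if i = j ∨ i + j = n - 1 then false else true))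

-- ===== PORT B =====
def verifica_poneglifo_alt (matriz : List (List String)) (n : Int) : Bool :=
  let expected : PySem.Set (Int × Int) :=
    PySem.Set.union (PySem.Set.ofList ((PySem.List.pyRange 0 n 1).map (fun i => (i, i))))
      (PySem.Set.ofList ((PySem.List.pyRange 0 n 1).map (fun i => (i, n - 1 - i))))
  let actual : PySem.Set (Int × Int) :=
    PySem.Set.ofList ((PySem.List.pyRange 0 n 1).flatMap (fun i =>
      (PySem.List.pyRange 0 n 1).filterMap (fun j =>
        if vpCell matriz i j == "X" then some (i, j) else none)))
  PySem.Set.equal actual expected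

-- ===== PRECONDITION & SPEC =====
-- Pre_ excludes undersized/ragged matrices (fewer than n rows, or a row among the first n
-- shorter than n): there the Python A either raises IndexError or returns False before reaching
-- the out-of-range cell, while B's full scan raises IndexError.
def Pre_verifica_poneglifo (matriz : List (List String)) (n : Int) : Prop :=
  n ≤ matriz.length ∧ ∀ row ∈ matriz.take n.toNat, n ≤ (row.length : Int)
instance (matriz : List (List String)) (n : Int) : Decidable (Pre_verifica_poneglifo matriz n) := by unfold Pre_verifica_poneglifo; infer_instance

def pvWitness_verifica_poneglifo : List (List String) × Int :=
  ([["X", ".", "X"], [".", "X", "."], ["X", ".", "X"]], 3)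

def Spec_verifica_poneglifo (matriz : List (List String)) (n : Int) (out : Bool) : Prop := out = verifica_poneglifo_alt matriz n
instance (matriz : List (List String)) (n : Int) (out : Bool) : Decidable (Spec_verifica_poneglifo matriz n out) := by unfold Spec_verifica_poneglifo; infer_instance

-- ===== CLAIM (what is proved, stated in full; the proofs are below) =====
def Claim_equal_verifica_poneglifo : Prop := ∀ (matriz : List (List String)) (n : Int), Dom_verifica_poneglifo matriz n → Pre_verifica_poneglifo matriz n → Spec_verifica_poneglifo matriz n (verifica_poneglifo matriz n)

-- ===== LEMMAS AND PROOFS =====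

-- A is the pointwise characterisation: each in-range cell is "X" exactly when it lies on a diagonal
theorem vpA_iff (matriz : List (List String)) (n : Int) :
    verifica_poneglifo matriz n = true ↔
      ∀ i j : Int, 0 ≤ i → i < n → 0 ≤ j → j < n →
        ((vpCell matriz i j = "X") ↔ (i = j ∨ i + j = n - 1)) := by
  simp only [verifica_poneglifo, List.all_eq_true, PySem.List.mem_pyRange_one]
  constructor
  · intro h i j hi0 hin hj0 hjn
    have := h i ⟨hi0, hin⟩ j ⟨hj0, hjn⟩
    by_cases hx : vpCell matriz i j = "X" <;> simp [hx] at this ⊢ <;> tauto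
  · intro h i hi j hj
    have := h i j hi.1 hi.2 hj.1 hj.2
    by_cases hx : vpCell matriz i j = "X" <;> simp [hx] at this ⊢ <;> tauto

-- B is the set-membership characterisation
theorem vpB_iff (matriz : List (List String)) (n : Int) :
    verifica_poneglifo_alt matriz n = true ↔
      ∀ x : Int × Int,
        ((∃ i : Int, (0 ≤ i ∧ i < n) ∧ ∃ j : Int, (0 ≤ j ∧ j < n) ∧ vpCell matriz i j = "X" ∧ (i, j) = x) ↔
         ((∃ i : Int, (0 ≤ i ∧ i < n) ∧ (i, i) = x) ∨ (∃ i : Int, (0 ≤ i ∧ i < n) ∧ (i, n - 1 - i) = x))) := by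
  simp only [verifica_poneglifo_alt, PySem.Set.equal_iff, PySem.Set.mem_union,
    PySem.Set.mem_ofList, List.mem_flatMap, List.mem_filterMap, List.mem_map,
    PySem.List.mem_pyRange_one, Option.ite_none_right_eq_some, Option.some.injEq, beq_iff_eq]

theorem vp_eq (matriz : List (List String)) (n : Int) :
    verifica_poneglifo matriz n = verifica_poneglifo_alt matriz n := by
  rw [Bool.eq_iff_iff, vpA_iff, vpB_iff]
  constructor
  · intro h x
    constructor
    · rintro ⟨i, hi, j, hj, hx, rfl⟩
      rcases (h i j hi.1 hi.2 hj.1 hj.2).mp hx with rfl | hd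
      · exact Or.inl ⟨i, hi, rfl⟩
      · exact Or.inr ⟨i, hi, by rw [show n - 1 - i = j by omega]⟩
    · rintro (⟨i, hi, rfl⟩ | ⟨i, hi, rfl⟩)
      · exact ⟨i, hi, i, hi, (h i i hi.1 hi.2 hi.1 hi.2).mpr (Or.inl rfl), rfl⟩
      · refine ⟨i, hi, n - 1 - i, ⟨by omega, by omega⟩, ?_, rfl⟩
        exact (h i (n - 1 - i) hi.1 hi.2 (by omega) (by omega)).mpr (Or.inr (by omega))
  · intro h i j hi0 hin hj0 hjn
    constructor
    · intro hx
      rcases (h (i, j)).mp ⟨i, ⟨hi0, hin⟩, j, ⟨hj0, hjn⟩, hx, rfl⟩ with ⟨k, hk, he⟩ | ⟨k, hk, he⟩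
      · obtain ⟨h1, h2⟩ := Prod.mk.injEq .. ▸ he; left; omega
      · obtain ⟨h1, h2⟩ := Prod.mk.injEq .. ▸ he; right; omega
    · intro hd
      have hm : (∃ k : Int, (0 ≤ k ∧ k < n) ∧ ((k, k) : Int × Int) = (i, j)) ∨
          (∃ k : Int, (0 ≤ k ∧ k < n) ∧ ((k, n - 1 - k) : Int × Int) = (i, j)) := by
        rcases hd with rfl | hs
        · exact Or.inl ⟨i, ⟨hi0, hin⟩, rfl⟩
        · exact Or.inr ⟨i, ⟨hi0, hin⟩, by rw [show n - 1 - i = j by omega]⟩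
      rcases (h (i, j)).mpr hm with ⟨a, ha, b, hb, hc, he⟩
      obtain ⟨h1, h2⟩ := Prod.mk.injEq .. ▸ he
      subst h1; subst h2; exact hc

-- ===== VERDICT (by name: the statement is the Claim_ definition above) =====
theorem verifica_poneglifo_spec : Claim_equal_verifica_poneglifo := by
  intro matriz n _ _
  unfold Spec_verifica_poneglifo
  exact vp_eq matriz n
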